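-- pv_equiv track=rewrite | github.com/aeolus-earth/sonde | cli/src/sonde/commands/skills.py | _extract_title_and_desc
-- ===== SOURCE A (Python) =====
-- def _extract_title_and_desc(content: str) -> tuple[str, str]:
--     """Extract the H1 title and first non-heading paragraph from a skill markdown file."""
--     title = ""
--     desc_lines: list[str] = []
--     in_desc = False
--
--     for line in content.splitlines():
--         if not title and line.startswith("# "):
--             title = line.removeprefix("# ").strip()
--             continue
--         # Skip sub-headings when looking for the description
--         if title and not in_desc:
--             stripped = line.strip()
--             if not stripped or stripped.startswith("#"):
--                 continue
--             in_desc = True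
--             desc_lines.append(stripped)
--         elif in_desc:
--             stripped = line.strip()
--             if not stripped:
--                 break
--             desc_lines.append(stripped)
--
--     return title, " ".join(desc_lines)
-- ===== SOURCE B (Python) =====
-- def _extract_title_and_desc(content: str) -> tuple[str, str]:
--     """Three-phase cursor scan: locate the H1 title, skip blanks/sub-headings, then collect the first paragraph."""
--     lines = content.splitlines()
--     n = len(lines)
--     i = 0
--     title = ""
--     # Phase 1: find a '# ' line whose title text is non-empty.
--     while i < n:
--         line = lines[i]
--         i += 1
--         if line.startswith("# "):
--             title = line.removeprefix("# ").strip()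
--             if title:
--                 break
--     if not title:
--         return "", ""
--     # Phase 2: skip blank lines and sub-headings.
--     while i < n:
--         s = lines[i].strip()
--         if s and not s.startswith("#"):
--             break
--         i += 1
--     # Phase 3: collect the paragraph up to the first blank line.
--     desc = []
--     while i < n:
--         s = lines[i].strip()
--         if not s:
--             break
--         desc.append(s)
--         i += 1
--     return title, " ".join(desc)
-- ===== Notes on version B (the rewrite author's own statement) =====
-- stated objective: simpler
-- what changed: Replaces A's single loop over a (title, desc_lines, in_desc) state machine with three sequential phases over one cursor: find the H1 title, skip blanks/sub-headings, collect the paragraph until the first blank line.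
import Mathlib
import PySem

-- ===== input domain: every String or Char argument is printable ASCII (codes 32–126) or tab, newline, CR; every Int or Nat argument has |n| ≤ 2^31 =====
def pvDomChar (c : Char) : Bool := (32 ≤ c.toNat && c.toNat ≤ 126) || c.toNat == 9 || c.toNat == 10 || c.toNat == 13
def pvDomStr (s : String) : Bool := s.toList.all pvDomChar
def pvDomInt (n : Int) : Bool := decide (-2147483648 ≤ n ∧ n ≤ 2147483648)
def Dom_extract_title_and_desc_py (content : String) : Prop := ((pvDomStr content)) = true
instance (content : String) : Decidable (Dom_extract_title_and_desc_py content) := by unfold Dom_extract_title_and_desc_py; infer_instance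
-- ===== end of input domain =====

-- B replaces A's single flag-driven loop by a three-phase cursor scan (find title / skip headings / collect paragraph); objective: simpler control flow, same cost.


-- str.removeprefix(p): s[len(p):] if s.startswith(p) else s — exact (pure list drop on code points)
def pyRemoveprefix (s p : String) : String :=
  if PySem.Str.startswith s p then String.ofList (s.toList.drop p.toList.length) else s

-- ===== PORT A =====
-- A's for-loop with state (title, desc_lines, in_desc); 'break' returns early
def pvLoopA (lines : List String) (title : String) (desc : List String) (in_desc : Bool) : String × String :=
  match lines with
  | [] => (title, PySem.Str.join " " desc)
  | l :: rest =>
    if title == "" && PySem.Str.startswith l "# " then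
      pvLoopA rest (PySem.Str.strip (pyRemoveprefix l "# ")) desc in_desc
    else if !(title == "") && !in_desc then
      let stripped := PySem.Str.strip l
      if stripped == "" || PySem.Str.startswith stripped "#" then
        pvLoopA rest title desc in_desc
      else
        pvLoopA rest title (desc ++ [stripped]) true
    else if in_desc then
      let stripped := PySem.Str.strip l
      if stripped == "" then (title, PySem.Str.join " " desc)      -- break
      else pvLoopA rest title (desc ++ [stripped]) in_desc
    else
      pvLoopA rest title desc in_desc

def extract_title_and_desc_py (content : String) : String × String :=
  pvLoopA (PySem.Str.splitlines content) "" [] false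

-- ===== PORT B =====
-- Phase 3: collect stripped lines of the paragraph until a blank line
def pvPhase3 (title : String) (desc : List String) (lines : List String) : String × String :=
  match lines with
  | [] => (title, PySem.Str.join " " desc)
  | l :: rest =>
    let s := PySem.Str.strip l
    if s == "" then (title, PySem.Str.join " " desc)
    else pvPhase3 title (desc ++ [s]) rest

-- Phase 2: skip blank lines and '#'-headed lines, then hand over to phase 3
def pvPhase2 (title : String) (lines : List String) : String × String :=
  match lines with
  | [] => (title, "")
  | l :: rest =>
    let s := PySem.Str.strip l
    if !(s == "") && !PySem.Str.startswith s "#" then pvPhase3 title [] (l :: rest)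
    else pvPhase2 title rest

-- Phase 1: find the first '# ' line with a non-empty title
def pvPhase1 (lines : List String) : String × String :=
  match lines with
  | [] => ("", "")
  | l :: rest =>
    if PySem.Str.startswith l "# " then
      let t := PySem.Str.strip (pyRemoveprefix l "# ")
      if t == "" then pvPhase1 rest else pvPhase2 t rest
    else pvPhase1 rest

def extract_title_and_desc_py_alt (content : String) : String × String :=
  pvPhase1 (PySem.Str.splitlines content)

-- ===== PRECONDITION & SPEC =====
def Spec_extract_title_and_desc_py (content : String) (out : String × String) : Prop := out = extract_title_and_desc_py_alt content
instance (content : String) (out : String × String) : Decidable (Spec_extract_title_and_desc_py content out) := by unfold Spec_extract_title_and_desc_py; infer_instance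

-- ===== CLAIM (what is proved, stated in full; the proofs are below) =====
def Claim_equal_extract_title_and_desc_py : Prop := ∀ (content : String), Dom_extract_title_and_desc_py content → Spec_extract_title_and_desc_py content (extract_title_and_desc_py content)

-- ===== LEMMAS AND PROOFS =====

-- with the in_desc flag set, A's loop is B's phase 3
theorem pvLoopA_eq_phase3 (lines : List String) (t : String) (acc : List String)
    (ht : (t == "") = false) : pvLoopA lines t acc true = pvPhase3 t acc lines := by
  induction lines generalizing acc with
  | nil => rfl
  | cons l rest ih =>
    simp only [pvLoopA, pvPhase3, ht]
    split <;> simp_all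

theorem pvLoopA_eq_phase2 (lines : List String) (t : String)
    (ht : (t == "") = false) : pvLoopA lines t [] false = pvPhase2 t lines := by
  induction lines with
  | nil => rfl
  | cons l rest ih =>
    simp only [pvLoopA, pvPhase2, ht]
    by_cases h1 : (PySem.Str.strip l == "") = true
    · simp [h1, ih]
    · by_cases h2 : PySem.Chars.startswith (PySem.Chars.strip l.toList) ['#'] = true
      · simp at h1
        simp [h1, h2, ih]
      · simp at h1
        simp only [Bool.not_eq_true] at h2
        simp only [pvPhase3, List.nil_append]
        simp [h1, h2]
        exact pvLoopA_eq_phase3 rest t [PySem.Str.strip l] ht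

theorem pvLoopA_eq_phase1 (lines : List String) : pvLoopA lines "" [] false = pvPhase1 lines := by
  induction lines with
  | nil => rfl
  | cons l rest ih =>
    simp only [pvLoopA, pvPhase1, beq_self_eq_true, Bool.true_and]
    by_cases hs : PySem.Chars.startswith l.toList ['#', ' '] = true
    · rw [if_pos (by simp [hs]), if_pos (by simp [hs])]
      by_cases ht : (PySem.Str.strip (pyRemoveprefix l "# ") == "") = true
      · rw [if_pos ht, eq_of_beq ht]; exact ih
      · simp only [Bool.not_eq_true] at ht
        rw [if_neg (by simp [ht])]
        exact pvLoopA_eq_phase2 rest _ ht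
    · simp only [Bool.not_eq_true] at hs
      simp [hs, ih]

-- ===== VERDICT (by name: the statement is the Claim_ definition above) =====
theorem extract_title_and_desc_py_spec : Claim_equal_extract_title_and_desc_py := by
  intro content _
  show extract_title_and_desc_py content = extract_title_and_desc_py_alt content
  unfold extract_title_and_desc_py extract_title_and_desc_py_alt
  exact pvLoopA_eq_phase1 _
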